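-- pv_equiv track=rewrite | github.com/francisk/rag-wh40k | DATAUPLOD/datachunk.py | process_indented_content
-- ===== SOURCE A (Python) =====
-- from typing import List, Dict, Any, Tuple
--
-- def get_indent_level(line: str) -> int:
--     """计算行的缩进级别"""
--     indent = 0
--     for char in line:
--         if char.isspace():
--             indent += 1
--         else:
--             break
--     return indent
--
-- def process_indented_content(lines: List[str], start_idx: int, base_indent: int) -> Tuple[List[str], int]:
--     """处理缩进内容，返回内容列表和下一个非缩进内容的索引"""
--     content = []
--     i = start_idx
--     while i < len(lines):
--         line = lines[i]
--         if not line.strip():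
--             i += 1
--             continue
--
--         current_indent = get_indent_level(line)
--         if current_indent <= base_indent:
--             break
--
--         content.append(line.strip())
--         i += 1
--     return content, i
-- ===== SOURCE B (Python) =====
-- def get_indent_level(line: str) -> int:
--     """计算行的缩进级别"""
--     indent = 0
--     for char in line:
--         if char.isspace():
--             indent += 1
--         else:
--             break
--     return indent
--
-- def process_indented_content(lines, start_idx, base_indent):
--     # Two-pass decomposition: first find the dedent boundary, then collect
--     # the stripped non-blank lines of the spanned region in one comprehension.
--     n = len(lines)
--     boundary = start_idx
--     while boundary < n:
--         line = lines[boundary]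
--         if line.strip() and get_indent_level(line) <= base_indent:
--             break
--         boundary += 1
--     content = [lines[i].strip() for i in range(start_idx, boundary) if lines[i].strip()]
--     return content, boundary
-- ===== Notes on version B (the rewrite author's own statement) =====
-- stated objective: alternative
-- what changed: A's single accumulate-while-scanning loop is split into a boundary-finding pass (first non-blank line with indent <= base_indent) followed by a separate comprehension that collects the stripped non-blank lines of the spanned index range.
import Mathlib
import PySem

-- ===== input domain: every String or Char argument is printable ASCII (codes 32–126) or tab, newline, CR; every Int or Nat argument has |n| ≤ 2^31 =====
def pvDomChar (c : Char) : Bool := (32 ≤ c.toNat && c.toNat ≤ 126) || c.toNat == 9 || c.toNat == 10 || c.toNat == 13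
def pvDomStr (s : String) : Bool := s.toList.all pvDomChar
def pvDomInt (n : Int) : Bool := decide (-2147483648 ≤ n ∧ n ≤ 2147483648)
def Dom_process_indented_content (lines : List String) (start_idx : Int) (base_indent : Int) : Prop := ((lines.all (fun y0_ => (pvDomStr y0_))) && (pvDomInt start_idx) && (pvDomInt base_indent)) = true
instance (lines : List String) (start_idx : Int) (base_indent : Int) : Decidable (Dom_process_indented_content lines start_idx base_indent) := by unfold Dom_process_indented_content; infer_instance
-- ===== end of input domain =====

-- B replaces A's single accumulate-and-break loop by a boundary-finding pass plus a
-- separate collecting comprehension over the spanned index range (alternative decomposition).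


-- ===== PORT A =====
-- get_indent_level: count leading whitespace chars, break at the first non-space
def get_indent_level_go : List Char → Int → Int
  | [], indent => indent
  | c :: cs, indent => if PySem.Chars.isspace c then get_indent_level_go cs (indent + 1) else indent

def get_indent_level (line : String) : Int := get_indent_level_go line.toList 0

-- the while-loop of A; fuel = (len(lines) - i).toNat so fuel = 0 ↔ the guard i < len fails.
-- pyGet? = none is Python's IndexError (start_idx < -len(lines)); excluded by Pre_ below.
def pic_loopA (lines : List String) (base_indent : Int) : Nat → Int → List String → List String × Int
  | 0, i, content => (content, i)
  | fuel + 1, i, content =>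
    match PySem.List.pyGet? lines i with
    | none => (content, i)
    | some line =>
      if PySem.Str.strip line = "" then pic_loopA lines base_indent fuel (i + 1) content
      else if get_indent_level line ≤ base_indent then (content, i)
      else pic_loopA lines base_indent fuel (i + 1) (content ++ [PySem.Str.strip line])

def process_indented_content (lines : List String) (start_idx : Int) (base_indent : Int) : List String × Int :=
  pic_loopA lines base_indent ((lines.length : Int) - start_idx).toNat start_idx []

-- ===== PORT B =====
-- first pass of B: the dedent boundary (same fuel convention as above)
def pic_boundary (lines : List String) (base_indent : Int) : Nat → Int → Int
  | 0, b => b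
  | fuel + 1, b =>
    match PySem.List.pyGet? lines b with
    | none => b
    | some line =>
      if PySem.Str.strip line ≠ "" ∧ get_indent_level line ≤ base_indent then b
      else pic_boundary lines base_indent fuel (b + 1)

def process_indented_content_alt (lines : List String) (start_idx : Int) (base_indent : Int) : List String × Int :=
  let boundary := pic_boundary lines base_indent ((lines.length : Int) - start_idx).toNat start_idx
  let content := (PySem.List.pyRange start_idx boundary 1).filterMap (fun i =>
    match PySem.List.pyGet? lines i with
    | none => none
    | some l => if PySem.Str.strip l = "" then none else some (PySem.Str.strip l))
  (content, boundary)

-- ===== PRECONDITION & SPEC =====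
-- Pre_ excludes exactly the inputs where Python A raises IndexError (start_idx < -len(lines))
def Pre_process_indented_content (lines : List String) (start_idx : Int) (base_indent : Int) : Prop :=
  -(lines.length : Int) ≤ start_idx

instance (lines : List String) (start_idx : Int) (base_indent : Int) : Decidable (Pre_process_indented_content lines start_idx base_indent) := by unfold Pre_process_indented_content; infer_instance

def pvWitness_process_indented_content : List String × Int × Int := (["title:", "  a", "", "  b", "next:"], 0, 0)

def Spec_process_indented_content (lines : List String) (start_idx : Int) (base_indent : Int) (out : List String × Int) : Prop := out = process_indented_content_alt lines start_idx base_indent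
instance (lines : List String) (start_idx : Int) (base_indent : Int) (out : List String × Int) : Decidable (Spec_process_indented_content lines start_idx base_indent out) := by unfold Spec_process_indented_content; infer_instance

-- ===== CLAIM (what is proved, stated in full; the proofs are below) =====
def Claim_equal_process_indented_content : Prop := ∀ (lines : List String) (start_idx : Int) (base_indent : Int), Dom_process_indented_content lines start_idx base_indent → Pre_process_indented_content lines start_idx base_indent → Spec_process_indented_content lines start_idx base_indent (process_indented_content lines start_idx base_indent)

-- ===== LEMMAS AND PROOFS =====

-- empty index range when the stop is not beyond the start
theorem pyRange_one_nil {a b : Int} (h : b ≤ a) : PySem.List.pyRange a b 1 = [] := by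
  simp [PySem.List.pyRange_of_pos a b Int.one_pos, h]

-- the boundary never moves left
theorem le_pic_boundary (lines : List String) (base_indent : Int) :
    ∀ (fuel : Nat) (b : Int), b ≤ pic_boundary lines base_indent fuel b := by
  intro fuel
  induction fuel with
  | zero => intro b; simp [pic_boundary]
  | succ n ih =>
    intro b
    simp only [pic_boundary]
    cases h : PySem.List.pyGet? lines b with
    | none => simp
    | some line =>
      dsimp only
      split
      · simp
      · exact le_trans (by omega) (ih (b + 1))

-- loop invariant: A's loop equals content ++ B's collected range, paired with B's boundary
theorem pic_loopA_eq (lines : List String) (base_indent : Int) :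
    ∀ (fuel : Nat) (i : Int) (content : List String),
      pic_loopA lines base_indent fuel i content =
        (content ++ (PySem.List.pyRange i (pic_boundary lines base_indent fuel i) 1).filterMap (fun j =>
            match PySem.List.pyGet? lines j with
            | none => none
            | some l => if PySem.Str.strip l = "" then none else some (PySem.Str.strip l)),
         pic_boundary lines base_indent fuel i) := by
  intro fuel
  induction fuel with
  | zero =>
    intro i content
    simp [pic_loopA, pic_boundary, pyRange_one_nil le_rfl]
  | succ n ih =>
    intro i content
    simp only [pic_loopA, pic_boundary]
    cases h : PySem.List.pyGet? lines i with
    | none => simp [pyRange_one_nil le_rfl]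
    | some line =>
      dsimp only
      by_cases hs : PySem.Str.strip line = ""
      · -- blank line: skipped by both passes
        have hb : i < pic_boundary lines base_indent n (i + 1) :=
          lt_of_lt_of_le (by omega) (le_pic_boundary lines base_indent n (i + 1))
        rw [if_pos hs, if_neg (by simp [hs]), ih (i + 1) content,
            PySem.List.pyRange_one_cons hb]
        simp [h, hs]
      · rw [if_neg hs]
        by_cases hle : get_indent_level line ≤ base_indent
        · -- dedent boundary: both stop here, empty range
          rw [if_pos hle, if_pos ⟨hs, hle⟩]
          simp [pyRange_one_nil le_rfl]
        · -- indented content line: A appends, B's comprehension keeps it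
          have hb : i < pic_boundary lines base_indent n (i + 1) :=
            lt_of_lt_of_le (by omega) (le_pic_boundary lines base_indent n (i + 1))
          rw [if_neg hle, if_neg (by tauto), ih (i + 1) (content ++ [PySem.Str.strip line]),
              PySem.List.pyRange_one_cons hb]
          simp [h, hs]

-- ===== VERDICT (by name: the statement is the Claim_ definition above) =====
theorem process_indented_content_spec : Claim_equal_process_indented_content := by
  intro lines start_idx base_indent _ _
  unfold Spec_process_indented_content process_indented_content process_indented_content_alt
  exact pic_loopA_eq lines base_indent _ start_idx []
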